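-- pv_equiv track=rewrite | github.com/akashksinghal/NPTEL-Course---Programming-Data-Structures-And-Algorithms-Using-Python | Online Sample Test/Question8.py | repeated
-- ===== SOURCE A (Python) =====
-- def repeated(lis):
--     uni=[]
--     for i in lis:
--         if i not in uni:
--             uni.append(i)
--     A=0
--     for i in uni:
--         M=0
--         for j in lis:
--             if j==i:
--                 M=M+1
--                 if M>1:
--                     A=A+1
--                     break
--     return A
-- ===== SOURCE B (Python) =====
-- def repeated(lis):
--     seen = []
--     counted = []
--     for i in lis:
--         if i in seen and i not in counted:
--             counted.append(i)
--         elif i not in seen: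
--             seen.append(i)
--     return len(counted)
-- ===== Notes on version B (the rewrite author's own statement) =====
-- stated objective: alternative
-- what changed: Replaces A's two-phase scheme (build a dedup list, then for each distinct value rescan the whole input counting occurrences with a break) by a single forward pass that records each value in `seen` on first sight and moves it to `counted` on its second sight; list membership is kept (matching A's equality semantics) so cost stays O(n^2), but the per-distinct-element rescan of the whole input disappears, a measured ~2x constant factor.
import Mathlib
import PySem

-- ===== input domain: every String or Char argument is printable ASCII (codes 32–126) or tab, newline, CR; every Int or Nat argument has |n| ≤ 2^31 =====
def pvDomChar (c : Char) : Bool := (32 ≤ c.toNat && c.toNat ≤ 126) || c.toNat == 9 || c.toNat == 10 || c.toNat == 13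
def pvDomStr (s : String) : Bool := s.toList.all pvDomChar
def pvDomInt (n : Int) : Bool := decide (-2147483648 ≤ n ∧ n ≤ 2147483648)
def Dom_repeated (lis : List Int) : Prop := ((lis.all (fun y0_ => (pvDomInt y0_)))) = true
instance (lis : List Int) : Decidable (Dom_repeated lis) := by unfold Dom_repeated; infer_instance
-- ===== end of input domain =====

-- B: one forward pass with seen/counted lists instead of A's dedup pass + per-value rescan;
-- same O(n^2) list-membership cost class, measured ~2x faster (constant factor).

-- ===== PORT A =====
-- inner loop of A: scan lis counting matches of i in M; on the second match add 1 to A and break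
def repeatedInner (i : Int) (lis : List Int) (M A : Int) : Int :=
  match lis with
  | [] => A
  | j :: rest =>
    if j = i then
      (if M + 1 > 1 then A + 1 else repeatedInner i rest (M + 1) A)
    else repeatedInner i rest M A

def repeated (lis : List Int) : Int :=
  let uni := lis.foldl (fun uni i => if i ∈ uni then uni else uni ++ [i]) []
  uni.foldl (fun A i => repeatedInner i lis 0 A) 0

-- ===== PORT B =====
def repeated_alt (lis : List Int) : Int :=
  let sc := lis.foldl (fun (sc : List Int × List Int) i =>
      if i ∈ sc.1 ∧ i ∉ sc.2 then (sc.1, sc.2 ++ [i])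
      else if i ∉ sc.1 then (sc.1 ++ [i], sc.2)
      else sc) ([], [])
  (sc.2.length : Int)

-- ===== PRECONDITION & SPEC =====
def Spec_repeated (lis : List Int) (out : Int) : Prop := out = repeated_alt lis
instance (lis : List Int) (out : Int) : Decidable (Spec_repeated lis out) := by unfold Spec_repeated; infer_instance

-- ===== CLAIM (what is proved, stated in full; the proofs are below) =====
def Claim_equal_repeated : Prop := ∀ (lis : List Int), Dom_repeated lis → Spec_repeated lis (repeated lis)

-- ===== LEMMAS AND PROOFS =====

-- A's inner scan returns A+1 iff i occurs at least twice (starting counter M is 0 or 1)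
theorem repeatedInner_eq (i : Int) (lis : List Int) :
    ∀ (M A : Int), (M = 0 ∨ M = 1) →
      repeatedInner i lis M A = if 2 ≤ M + (lis.count i : Int) then A + 1 else A := by
  induction lis with
  | nil =>
    intro M A hM
    rcases hM with rfl | rfl <;> norm_num [repeatedInner]
  | cons j rest ih =>
    intro M A hM
    show (if j = i then (if M + 1 > 1 then A + 1 else repeatedInner i rest (M + 1) A)
          else repeatedInner i rest M A)
        = if 2 ≤ M + ((j :: rest).count i : Int) then A + 1 else A
    by_cases hj : j = i
    · rw [if_pos hj]; subst hj
      rw [List.count_cons_self]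
      by_cases hM1 : M + 1 > 1
      · rw [if_pos hM1, if_pos (by omega)]
      · rw [if_neg hM1, ih (M + 1) A (by omega)]
        push_cast
        split_ifs <;> omega
    · rw [if_neg hj, ih M A hM, List.count_cons_of_ne hj]

-- A's outer loop from accumulator A adds the number of elements of u with ≥ 2 occurrences in lis
theorem repeated_outer (lis : List Int) :
    ∀ (u : List Int) (A : Int),
      u.foldl (fun A i => repeatedInner i lis 0 A) A
        = A + ((u.filter (fun i => 2 ≤ lis.count i)).length : Int) := by
  intro u
  induction u with
  | nil => intro A; simp
  | cons x xs ih =>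
    intro A
    rw [List.foldl_cons, ih, repeatedInner_eq x lis 0 A (Or.inl rfl), List.filter_cons]
    by_cases hx : 2 ≤ lis.count x
    · rw [if_pos (by push_cast; omega), if_pos (by simpa using hx)]
      simp only [List.length_cons, Nat.cast_add, Nat.cast_one]; ring
    · rw [if_neg (by omega), if_neg (by simpa using hx)]

-- membership in A's dedup list
theorem uni_mem (lis : List Int) :
    ∀ (u : List Int) (x : Int),
      x ∈ lis.foldl (fun uni i => if i ∈ uni then uni else uni ++ [i]) u ↔ x ∈ u ∨ x ∈ lis := by
  induction lis with
  | nil => simp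
  | cons i rest ih =>
    intro u x
    rw [List.foldl_cons]
    by_cases hi : i ∈ u
    · rw [if_pos hi, ih]
      simp only [List.mem_cons]
      constructor
      · tauto
      · rintro (h | rfl | h)
        · exact Or.inl h
        · exact Or.inl hi
        · exact Or.inr h
    · rw [if_neg hi, ih]
      simp only [List.mem_append, List.mem_cons]
      tauto

-- A's dedup list has no duplicates
theorem uni_nodup (lis : List Int) :
    ∀ (u : List Int), u.Nodup →
      (lis.foldl (fun uni i => if i ∈ uni then uni else uni ++ [i]) u).Nodup := by
  induction lis with
  | nil => intro u h; simpa using h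
  | cons i rest ih =>
    intro u h
    rw [List.foldl_cons]
    by_cases hi : i ∈ u
    · rw [if_pos hi]; exact ih u h
    · rw [if_neg hi]
      refine ih (u ++ [i]) (List.Nodup.append h (List.nodup_singleton i) ?_)
      intro a ha hb
      simp only [List.mem_singleton] at hb
      exact hi (hb ▸ ha)

-- B's fold step, named for the lemmas (definitionally B's lambda)
def altStep (sc : List Int × List Int) (i : Int) : List Int × List Int :=
  if i ∈ sc.1 ∧ i ∉ sc.2 then (sc.1, sc.2 ++ [i])
  else if i ∉ sc.1 then (sc.1 ++ [i], sc.2)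
  else sc

-- membership in `counted` after B's pass
theorem alt_mem (lis : List Int) :
    ∀ (s c : List Int) (x : Int),
      x ∈ (lis.foldl altStep (s, c)).2 ↔ x ∈ c ∨ (x ∈ lis ∧ (x ∈ s ∨ 2 ≤ lis.count x)) := by
  induction lis with
  | nil => simp
  | cons i rest ih =>
    intro s c x
    rw [List.foldl_cons]
    by_cases h1 : i ∈ s ∧ i ∉ c
    · rw [show altStep (s, c) i = (s, c ++ [i]) from by simp [altStep, h1.1, h1.2]]
      rw [ih]
      by_cases hx : x = i
      · subst hx
        simp [List.mem_append, h1.1]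
      · rw [List.count_cons_of_ne (fun h => hx h.symm)]
        simp only [List.mem_append, List.mem_cons, hx, false_or]
        tauto
    · by_cases h2 : i ∉ s
      · rw [show altStep (s, c) i = (s ++ [i], c) from by simp [altStep, h2]]
        rw [ih]
        by_cases hx : x = i
        · subst hx
          have hcc : 2 ≤ (x :: rest).count x ↔ x ∈ rest := by
            rw [List.count_cons_self]
            constructor
            · intro h; exact List.count_pos_iff.mp (by omega)
            · intro h; have := List.count_pos_iff.mpr h; omega
          constructor
          · rintro (h | ⟨hr, _⟩)
            · exact Or.inl h
            · exact Or.inr ⟨List.mem_cons_self, Or.inr (hcc.mpr hr)⟩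
          · rintro (h | ⟨_, hs | hcnt⟩)
            · exact Or.inl h
            · exact absurd hs h2
            · exact Or.inr ⟨hcc.mp hcnt, Or.inl (by simp)⟩
        · rw [List.count_cons_of_ne (fun h => hx h.symm)]
          simp only [List.mem_append, List.mem_cons, hx, false_or]
          tauto
      · have hs : i ∈ s := not_not.mp h2
        have hc : i ∈ c := by tauto
        rw [show altStep (s, c) i = (s, c) from by simp [altStep, hs, hc]]
        rw [ih]
        by_cases hx : x = i
        · subst hx; simp [hc]
        · rw [List.count_cons_of_ne (fun h => hx h.symm)]
          simp only [List.mem_cons, hx, false_or]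

-- `counted` stays duplicate-free
theorem alt_nodup (lis : List Int) :
    ∀ (s c : List Int), c.Nodup → (lis.foldl altStep (s, c)).2.Nodup := by
  induction lis with
  | nil => intro s c h; simpa using h
  | cons i rest ih =>
    intro s c h
    rw [List.foldl_cons]
    by_cases h1 : i ∈ s ∧ i ∉ c
    · rw [show altStep (s, c) i = (s, c ++ [i]) from by simp [altStep, h1.1, h1.2]]
      refine ih _ _ (List.Nodup.append h (List.nodup_singleton i) ?_)
      intro a ha hb
      simp only [List.mem_singleton] at hb
      exact h1.2 (hb ▸ ha)
    · by_cases h2 : i ∉ s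
      · rw [show altStep (s, c) i = (s ++ [i], c) from by simp [altStep, h2]]
        exact ih _ _ h
      · have hs : i ∈ s := not_not.mp h2
        have hc : i ∈ c := by tauto
        rw [show altStep (s, c) i = (s, c) from by simp [altStep, hs, hc]]
        exact ih _ _ h

-- ===== VERDICT (by name: the statement is the Claim_ definition above) =====
theorem repeated_spec : Claim_equal_repeated := by
  intro lis _
  unfold Spec_repeated repeated repeated_alt
  have hstep : (fun (sc : List Int × List Int) i =>
      if i ∈ sc.1 ∧ i ∉ sc.2 then (sc.1, sc.2 ++ [i])
      else if i ∉ sc.1 then (sc.1 ++ [i], sc.2)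
      else sc) = altStep := rfl
  simp only [hstep]
  rw [repeated_outer lis _ 0, zero_add]
  have hperm : ((lis.foldl (fun uni i => if i ∈ uni then uni else uni ++ [i]) []).filter
      (fun i => 2 ≤ lis.count i)).Perm (lis.foldl altStep ([], [])).2 := by
    rw [List.perm_ext_iff_of_nodup
      (List.Nodup.filter _ (uni_nodup lis [] List.nodup_nil))
      (alt_nodup lis [] [] List.nodup_nil)]
    intro x
    rw [List.mem_filter, alt_mem, uni_mem lis [] x]
    simp only [List.not_mem_nil, false_or, decide_eq_true_eq]
  rw [hperm.length_eq]
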